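-- pv_equiv track=rewrite | github.com/xtjiang1/Lane_Detection | Code/LaneDetection_part2.py | prioritize_solid_over_dashed
-- ===== SOURCE A (Python) =====
-- def prioritize_solid_over_dashed(points, binary_mask, detected_pattern):
--     """
--     当同时检测到实线和虚线时，优先选择实线
--     """
--     if detected_pattern == 'Solid':
--         return 'Solid'
--
--     # 检查是否有足够的连续像素来确认实线
--     if len(points) > 0:
--         # 计算点的密度
--         y_coords = [p[0] for p in points]
--         x_coords = [p[1] for p in points]
--
--         # 检查纵向连续性
--         sorted_points = sorted(points, key=lambda x: x[0])
--         consecutive_count = 1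
--         max_consecutive = 1
--
--         for i in range(1, len(sorted_points)):
--             if abs(sorted_points[i][0] - sorted_points[i - 1][0]) <= 2:  # 允许间隔1-2个像素
--                 consecutive_count += 1
--             else:
--                 max_consecutive = max(max_consecutive, consecutive_count)
--                 consecutive_count = 1
--
--         max_consecutive = max(max_consecutive, consecutive_count)
--
--         # 如果有足够的连续像素，优先认定为实线
--         if max_consecutive > 10:  # 阈值可以根据实际情况调整
--             return 'Solid'
--
--     return detected_pattern
-- ===== SOURCE B (Python) =====
-- def prioritize_solid_over_dashed(points, binary_mask, detected_pattern):
--     if detected_pattern == 'Solid':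
--         return 'Solid'
--     if not points:
--         return detected_pattern
--     hist = {}
--     for p in points:
--         hist[p[0]] = hist.get(p[0], 0) + 1
--     keys = sorted(hist)
--     run = best = hist[keys[0]]
--     for prev, cur in zip(keys, keys[1:]):
--         if cur - prev <= 2:
--             run += hist[cur]
--         else:
--             run = hist[cur]
--         best = max(best, run)
--     if best > 10:
--         return 'Solid'
--     return detected_pattern
-- ===== Notes on version B (the rewrite author's own statement) =====
-- stated objective: alternative
-- what changed: Replaces the sort-all-points-and-scan-adjacent-indices pass with a y-histogram (dict counter) plus a scan over the sorted distinct y-values that adds whole bucket counts per step, tracking the best running total.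
import Mathlib
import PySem

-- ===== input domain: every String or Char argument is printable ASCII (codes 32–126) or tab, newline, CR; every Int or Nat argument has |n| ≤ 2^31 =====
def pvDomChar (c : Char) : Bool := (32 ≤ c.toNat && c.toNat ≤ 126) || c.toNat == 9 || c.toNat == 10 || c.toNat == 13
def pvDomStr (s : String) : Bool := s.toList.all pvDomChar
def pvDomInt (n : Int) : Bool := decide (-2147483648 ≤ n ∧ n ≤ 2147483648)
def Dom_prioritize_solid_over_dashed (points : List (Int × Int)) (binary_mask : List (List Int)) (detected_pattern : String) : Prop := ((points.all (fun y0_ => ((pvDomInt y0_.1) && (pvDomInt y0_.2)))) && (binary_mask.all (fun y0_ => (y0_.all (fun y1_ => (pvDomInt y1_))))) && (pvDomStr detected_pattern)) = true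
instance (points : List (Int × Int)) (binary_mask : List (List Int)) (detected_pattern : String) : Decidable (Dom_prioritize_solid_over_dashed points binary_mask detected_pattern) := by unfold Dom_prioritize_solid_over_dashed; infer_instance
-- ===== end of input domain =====

-- B replaces A's sort-all-points-and-scan-adjacent-elements pass by a y-histogram plus a scan
-- over the sorted distinct y-values adding whole bucket counts per step (alternative algorithm,
-- similar cost); return values proved equal on all inputs.

-- ===== PORT A =====
def prioritize_solid_over_dashed (points : List (Int × Int)) (binary_mask : List (List Int)) (detected_pattern : String) : String :=
  if detected_pattern == "Solid" then "Solid"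
  else if points.length > 0 then
    let _y_coords := points.map (fun p => p.1)
    let _x_coords := points.map (fun p => p.2)
    let sorted_points := PySem.List.sorted points (fun x => x.1)
    -- for i in range(1, len(sorted_points)): state = (consecutive_count, max_consecutive)
    let st := (PySem.List.pyRange 1 (sorted_points.length : Int)).foldl
      (fun (st : Int × Int) i =>
        if |(PySem.List.pyGetD sorted_points i (0, 0)).1 - (PySem.List.pyGetD sorted_points (i - 1) (0, 0)).1| ≤ 2
        then (st.1 + 1, st.2)
        else (1, max st.2 st.1)) (1, 1)
    let max_consecutive := max st.2 st.1
    if max_consecutive > 10 then "Solid" else detected_pattern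
  else detected_pattern

-- ===== PORT B =====
def prioritize_solid_over_dashed_alt (points : List (Int × Int)) (binary_mask : List (List Int)) (detected_pattern : String) : String :=
  if detected_pattern == "Solid" then "Solid"
  else if points = [] then detected_pattern
  else
    let hist := points.foldl (fun (d : PySem.Dict Int Int) p => d.insert p.1 (d.getD p.1 0 + 1)) PySem.Dict.empty
    let keys := PySem.List.sorted hist.keys (fun x => x)
    let first := hist.getD (PySem.List.pyGetD keys 0 0) 0
    -- for prev, cur in zip(keys, keys[1:]): state = (run, best); keys[1:] is keys.tail
    let st := (keys.zip keys.tail).foldl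
      (fun (st : Int × Int) pc =>
        let run := if pc.2 - pc.1 ≤ 2 then st.1 + hist.getD pc.2 0 else hist.getD pc.2 0
        (run, max st.2 run)) (first, first)
    if st.2 > 10 then "Solid" else detected_pattern

-- ===== PRECONDITION & SPEC =====
def Spec_prioritize_solid_over_dashed (points : List (Int × Int)) (binary_mask : List (List Int)) (detected_pattern : String) (out : String) : Prop := out = prioritize_solid_over_dashed_alt points binary_mask detected_pattern
instance (points : List (Int × Int)) (binary_mask : List (List Int)) (detected_pattern : String) (out : String) : Decidable (Spec_prioritize_solid_over_dashed points binary_mask detected_pattern out) := by unfold Spec_prioritize_solid_over_dashed; infer_instance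

-- ===== CLAIM (what is proved, stated in full; the proofs are below) =====
def Claim_equal_prioritize_solid_over_dashed : Prop := ∀ (points : List (Int × Int)) (binary_mask : List (List Int)) (detected_pattern : String), Dom_prioritize_solid_over_dashed points binary_mask detected_pattern → Spec_prioritize_solid_over_dashed points binary_mask detected_pattern (prioritize_solid_over_dashed points binary_mask detected_pattern)

-- ===== LEMMAS AND PROOFS =====

-- A's scan, structurally: prev = previous y, c = consecutive_count, m = max_consecutive
def runA (prev c m : Int) : List Int → Int × Int
  | [] => (c, m)
  | y :: t => if |y - prev| ≤ 2 then runA y (c + 1) m t else runA y 1 (max m c) t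

-- shared "max merged-segment weight" over the remaining distinct keys
def gmax (ys : List Int) (prev run : Int) : List Int → Int
  | [] => run
  | k :: t => if k - prev ≤ 2 then gmax ys k (run + (ys.count k : Int)) t
              else max run (gmax ys k ((ys.count k : Int)) t)

-- B's scan, structurally: (run, best) over the remaining distinct keys
def runB (ys : List Int) (prev run best : Int) : List Int → Int
  | [] => best
  | k :: t =>
    if k - prev ≤ 2 then runB ys k (run + (ys.count k : Int)) (max best (run + (ys.count k : Int))) t
    else runB ys k ((ys.count k : Int)) (max best ((ys.count k : Int))) t

-- the sorted y-multiset, grouped into buckets of equal values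
def flat (ys : List Int) (ks : List Int) : List Int := ks.flatMap (fun k => List.replicate (ys.count k) k)

lemma loopA (s : List (Int × Int)) :
    ∀ (n j : Nat) (c m : Int), j < s.length → s.length - (j + 1) = n →
    (PySem.List.pyRange ((j : Int) + 1) (s.length : Int)).foldl
      (fun (st : Int × Int) i =>
        if |(PySem.List.pyGetD s i (0, 0)).1 - (PySem.List.pyGetD s (i - 1) (0, 0)).1| ≤ 2
        then (st.1 + 1, st.2)
        else (1, max st.2 st.1)) (c, m)
    = runA (s.getD j (0, 0)).1 c m ((s.drop (j + 1)).map (fun p => p.1)) := by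
  intro n
  induction n with
  | zero =>
    intro j c m hj hn
    have h1 : (s.length : Int) ≤ (j : Int) + 1 := by exact_mod_cast Nat.le_of_sub_eq_zero hn
    have h2 : PySem.List.pyRange ((j : Int) + 1) (s.length : Int) = [] := by
      simp [PySem.List.pyRange]; omega
    have h3 : s.drop (j + 1) = [] := List.drop_eq_nil_of_le (by omega)
    rw [h2, h3]
    simp [runA]
  | succ n ih =>
    intro j c m hj hn
    have hj1 : j + 1 < s.length := by omega
    have hlt : ((j : Int) + 1) < (s.length : Int) := by exact_mod_cast hj1
    rw [PySem.List.pyRange_one_cons hlt]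
    rw [List.foldl_cons]
    have e1 : PySem.List.pyGetD s ((j : Int) + 1) (0, 0) = s[j + 1] := by
      rw [PySem.List.pyGetD_eq_getElem s (0,0) (by omega) (by exact_mod_cast hj1)]
      congr 1
    have e2 : PySem.List.pyGetD s ((j : Int) + 1 - 1) (0, 0) = s.getD j (0, 0) := by
      have : (j : Int) + 1 - 1 = (j : Int) := by ring
      rw [this, PySem.List.pyGetD_natCast]
    have e3 : s.drop (j + 1) = s[j + 1] :: s.drop (j + 2) := (List.getElem_cons_drop hj1).symm
    have e4 : (j : Int) + 1 + 1 = ((j + 1 : Nat) : Int) + 1 := by push_cast; ring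
    rw [e1, e2, e3, List.map_cons]
    show List.foldl _ _ _ = runA (s.getD j (0, 0)).1 c m (s[j+1].1 :: (s.drop (j + 1 + 1)).map (fun p => p.1))
    rw [runA]
    split_ifs with h
    · rw [e4, ih (j + 1) (c + 1) m hj1 (by omega)]
      congr 1
      rw [List.getD_eq_getElem s (0,0) hj1]
    · rw [e4, ih (j + 1) 1 (max m c) hj1 (by omega)]
      congr 1
      rw [List.getD_eq_getElem s (0,0) hj1]

lemma zipB (ys : List Int) :
    ∀ (t : List Int) (prev run best : Int),
    (((prev :: t).zip t).foldl
      (fun (st : Int × Int) pc =>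
        (if pc.2 - pc.1 ≤ 2 then st.1 + (ys.count pc.2 : Int) else (ys.count pc.2 : Int),
         max st.2 (if pc.2 - pc.1 ≤ 2 then st.1 + (ys.count pc.2 : Int) else (ys.count pc.2 : Int)))) (run, best)).2
    = runB ys prev run best t := by
  intro t
  induction t with
  | nil => intro prev run best; simp [runB]
  | cons k t ih =>
    intro prev run best
    rw [List.zip_cons_cons, List.foldl_cons, runB]
    dsimp only
    split_ifs with h
    · exact ih k _ _
    · exact ih k _ _

lemma runA_replicate (k c m : Int) (rest : List Int) :
    ∀ (n : Nat), runA k c m (List.replicate n k ++ rest) = runA k (c + (n : Int)) m rest := by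
  intro n
  induction n generalizing c with
  | zero => simp
  | succ n ih =>
    rw [List.replicate_succ, List.cons_append, runA]
    rw [if_pos (by simp)]
    rw [ih (c + 1)]
    congr 1
    push_cast
    ring

lemma blockA (ys : List Int) :
    ∀ (kt : List Int) (prev c m : Int), (∀ k ∈ kt, prev < k) → kt.Pairwise (· < ·) →
    (∀ k ∈ kt, 0 < ys.count k) →
    max (runA prev c m (flat ys kt)).2 (runA prev c m (flat ys kt)).1 = max m (gmax ys prev c kt) := by
  intro kt
  induction kt with
  | nil => intro prev c m _ _ _; simp [flat, runA, gmax, max_comm]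
  | cons k t ih =>
    intro prev c m hlt hpw hcnt
    have hk : prev < k := hlt k List.mem_cons_self
    have hn : 0 < ys.count k := hcnt k List.mem_cons_self
    obtain ⟨n', hn'⟩ : ∃ n', ys.count k = n' + 1 := ⟨ys.count k - 1, by omega⟩
    have hflat : flat ys (k :: t) = k :: (List.replicate n' k ++ flat ys t) := by
      simp [flat, hn', List.replicate_succ]
    rw [hflat, runA, gmax]
    have habs : |k - prev| = k - prev := abs_of_pos (by omega)
    rw [habs]
    have ht1 : ∀ k' ∈ t, k < k' := (List.pairwise_cons.mp hpw).1
    have ht2 : t.Pairwise (· < ·) := (List.pairwise_cons.mp hpw).2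
    have ht3 : ∀ k' ∈ t, 0 < ys.count k' := fun k' h => hcnt k' (List.mem_cons_of_mem _ h)
    split_ifs with h
    · rw [runA_replicate, ih k (c + 1 + (n' : Int)) m ht1 ht2 ht3]
      congr 2
      rw [hn']
      push_cast
      ring
    · rw [runA_replicate, ih k (1 + (n' : Int)) (max m c) ht1 ht2 ht3]
      have : (1 : Int) + (n' : Int) = (ys.count k : Int) := by rw [hn']; push_cast; ring
      rw [this, max_assoc]

lemma gmax_ge (ys : List Int) :
    ∀ (kt : List Int) (prev c : Int), c ≤ gmax ys prev c kt := by
  intro kt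
  induction kt with
  | nil => intro prev c; simp [gmax]
  | cons k t ih =>
    intro prev c
    rw [gmax]
    split_ifs with h
    · exact le_trans (le_add_of_nonneg_right (Int.natCast_nonneg _)) (ih k (c + (ys.count k : Int)))
    · exact le_max_left _ _

lemma blockB (ys : List Int) :
    ∀ (kt : List Int) (prev run best : Int), run ≤ best →
    runB ys prev run best kt = max best (gmax ys prev run kt) := by
  intro kt
  induction kt with
  | nil => intro prev run best h; rw [runB, gmax, max_eq_left h]
  | cons k t ih =>
    intro prev run best h
    rw [runB, gmax]
    split_ifs with hgap
    · rw [ih k _ _ (le_max_right _ _)]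
      have hg := gmax_ge ys t k (run + (ys.count k : Int))
      omega
    · rw [ih k _ _ (le_max_right _ _)]
      have hg := gmax_ge ys t k ((ys.count k : Int))
      omega

lemma count_flat (ys : List Int) :
    ∀ (ks : List Int), ks.Nodup → ∀ x, (flat ys ks).count x = if x ∈ ks then ys.count x else 0 := by
  intro ks
  induction ks with
  | nil => intro _ x; simp [flat]
  | cons k t ih =>
    intro hnd x
    have hnd' := (List.nodup_cons.mp hnd).2
    have hkt := (List.nodup_cons.mp hnd).1
    have : flat ys (k :: t) = List.replicate (ys.count k) k ++ flat ys t := by simp [flat]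
    rw [this, List.count_append, List.count_replicate, ih hnd' x]
    by_cases hx : x = k
    · subst hx
      simp [hkt]
    · simp [hx, Ne.symm hx, List.mem_cons]

lemma pairwise_flat (ys : List Int) :
    ∀ (ks : List Int), ks.Pairwise (· < ·) → (flat ys ks).Pairwise (· ≤ ·) := by
  intro ks
  induction ks with
  | nil => simp [flat]
  | cons k t ih =>
    intro hpw
    have h1 := (List.pairwise_cons.mp hpw).1
    have h2 := (List.pairwise_cons.mp hpw).2
    have : flat ys (k :: t) = List.replicate (ys.count k) k ++ flat ys t := by simp [flat]
    rw [this, List.pairwise_append]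
    refine ⟨?_, ih h2, ?_⟩
    · rw [List.pairwise_replicate]; right; exact le_refl k
    · intro a ha b hb
      rw [List.eq_of_mem_replicate ha]
      obtain ⟨k', hk', hb'⟩ := List.mem_flatMap.mp hb
      rw [List.eq_of_mem_replicate hb']
      exact le_of_lt (h1 k' hk')

lemma sorted_map_eq_flat (points : List (Int × Int)) :
    (PySem.List.sorted points (fun x => x.1)).map (fun p => p.1)
      = flat (points.map (fun p => p.1))
          (PySem.List.sorted (PySem.Set.ofList (points.map (fun p => p.1))) (fun x => x)) := by
  set ys := points.map (fun p => p.1) with hys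
  set ks := PySem.List.sorted (PySem.Set.ofList ys) (fun x => x) with hks
  have hks_lt : ks.Pairwise (· < ·) := PySem.List.sorted_ofList_pairwise_lt ys
  have hks_nd : ks.Nodup := hks_lt.imp ne_of_lt
  have hmem : ∀ k, k ∈ ks ↔ k ∈ ys := by
    intro k
    rw [hks, PySem.List.mem_sorted, PySem.Set.mem_ofList]
  have hperm1 : ((PySem.List.sorted points (fun x => x.1)).map (fun p => p.1)).Perm ys :=
    (PySem.List.sorted_perm points (fun x => x.1) false).map _
  have hperm2 : (flat ys ks).Perm ys := by
    rw [List.perm_iff_count]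
    intro a
    rw [count_flat ys ks hks_nd a]
    by_cases ha : a ∈ ks
    · simp [ha]
    · have : a ∉ ys := fun h => ha ((hmem a).mpr h)
      simp [ha, List.count_eq_zero.mpr this]
  refine PySem.List.eq_of_perm_of_pairwise_le_of_injective (fun x => x) (fun a b h => h)
    (hperm1.trans hperm2.symm) ?_ ?_
  · exact PySem.List.sorted_map_key_pairwise points (fun x => x.1)
  · exact pairwise_flat ys ks hks_lt

lemma hist_eq (points : List (Int × Int)) :
    points.foldl (fun (d : PySem.Dict Int Int) p => d.insert p.1 (d.getD p.1 0 + 1)) PySem.Dict.empty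
      = PySem.Dict.counter (points.map (fun p => p.1)) := by
  rw [← PySem.Dict.foldl_insert_getD_add_one_eq_counter, List.foldl_map]

-- ===== VERDICT (by name: the statement is the Claim_ definition above) =====
theorem prioritize_solid_over_dashed_spec : Claim_equal_prioritize_solid_over_dashed := by
  intro points binary_mask dp _
  unfold Spec_prioritize_solid_over_dashed prioritize_solid_over_dashed prioritize_solid_over_dashed_alt
  by_cases hdp : (dp == "Solid") = true
  · simp [hdp]
  · rw [if_neg hdp, if_neg hdp]
    cases hpts : points with
    | nil => simp
    | cons p ps =>
      rw [← hpts]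
      have hne : points ≠ [] := by rw [hpts]; exact List.cons_ne_nil _ _
      rw [if_pos (by rw [hpts]; simp), if_neg hne]
      dsimp only
      set ys := points.map (fun p => p.1) with hys
      set sp := PySem.List.sorted points (fun x => x.1) with hsp
      set ks := PySem.List.sorted (PySem.Set.ofList ys) (fun x => x) with hks
      have hsplen : sp.length = points.length := PySem.List.length_sorted points _ false
      have hsplen1 : 0 < sp.length := by rw [hsplen, hpts]; simp
      -- rewrite the A-side fold via loopA at j = 0
      have hA := loopA sp (sp.length - 1) 0 1 1 hsplen1 (by omega)
      simp only [Nat.cast_zero, zero_add] at hA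
      rw [hA]
      -- rewrite the B-side dict to the counter and its keys to ks
      rw [hist_eq, PySem.Dict.keys_counter, ← hys, ← hks]
      simp only [PySem.Dict.getD_counter]
      -- decompose the sorted y-multiset into buckets
      have hflat : sp.map (fun p => p.1) = flat ys ks := sorted_map_eq_flat points
      have hmem : ∀ k, k ∈ ks ↔ k ∈ ys := by
        intro k
        rw [hks, PySem.List.mem_sorted, PySem.Set.mem_ofList]
      have hks_lt : ks.Pairwise (· < ·) := PySem.List.sorted_ofList_pairwise_lt ys
      have hksne : ks ≠ [] := by
        intro h
        have : p.1 ∈ ys := by rw [hys, hpts]; simp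
        exact absurd ((hmem p.1).mpr this) (by rw [h]; simp)
      obtain ⟨k0, kt, hk⟩ : ∃ k0 kt, ks = k0 :: kt := by
        cases hc : ks with
        | nil => exact absurd hc hksne
        | cons a b => exact ⟨a, b, rfl⟩
      have hk0ys : k0 ∈ ys := (hmem k0).mp (by rw [hk]; simp)
      have hn0 : 0 < ys.count k0 := List.count_pos_iff.mpr hk0ys
      obtain ⟨n', hn'⟩ : ∃ n', ys.count k0 = n' + 1 := ⟨ys.count k0 - 1, by omega⟩
      -- sp is nonempty; identify its head and tail through hflat
      cases hspc : sp with
      | nil => rw [hspc] at hsplen1; simp at hsplen1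
      | cons q qs =>
        have hflat' : q.1 :: qs.map (fun p => p.1) = k0 :: (List.replicate n' k0 ++ flat ys kt) := by
          rw [← List.map_cons, ← hspc, hflat, hk]
          simp [flat, hn', List.replicate_succ]
        have hq : q.1 = k0 := (List.cons.injEq _ _ _ _).mp hflat' |>.1
        have hqs : qs.map (fun p => p.1) = List.replicate n' k0 ++ flat ys kt :=
          (List.cons.injEq _ _ _ _).mp hflat' |>.2
        simp only [List.getD_cons_zero, List.drop_succ_cons, List.drop_zero]
        rw [hq, hqs, runA_replicate]
        -- A's final max via blockA
        have ht1 : ∀ k' ∈ kt, k0 < k' := by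
          have := hks_lt
          rw [hk, List.pairwise_cons] at this
          exact this.1
        have ht2 : kt.Pairwise (· < ·) := by
          have := hks_lt
          rw [hk, List.pairwise_cons] at this
          exact this.2
        have ht3 : ∀ k' ∈ kt, 0 < ys.count k' := by
          intro k' h
          exact List.count_pos_iff.mpr ((hmem k').mp (by rw [hk]; exact List.mem_cons_of_mem _ h))
        have hAval := blockA ys kt k0 (1 + (n' : Int)) 1 ht1 ht2 ht3
        have hcast : (1 : Int) + (n' : Int) = (ys.count k0 : Int) := by rw [hn']; push_cast; ring
        rw [hAval, hcast]
        -- B's side: keys, first, zip fold via zipB and blockB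
        rw [hk]
        simp only [List.tail_cons, PySem.List.pyGetD_zero_cons]
        rw [zipB ys kt k0 ((ys.count k0 : Int)) ((ys.count k0 : Int))]
        rw [blockB ys kt k0 _ _ (le_refl _)]
        -- both reduce to gmax ys k0 (count k0) kt
        have hg := gmax_ge ys kt k0 ((ys.count k0 : Int))
        have h1 : max (1 : Int) (gmax ys k0 ((ys.count k0 : Int)) kt) = gmax ys k0 ((ys.count k0 : Int)) kt := by
          apply max_eq_right
          have : (1 : Int) ≤ (ys.count k0 : Int) := by exact_mod_cast hn0
          omega
        have h2 : max ((ys.count k0 : Int)) (gmax ys k0 ((ys.count k0 : Int)) kt) = gmax ys k0 ((ys.count k0 : Int)) kt :=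
          max_eq_right hg
        rw [h1, h2]
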